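-- pv_equiv track=rewrite | github.com/aman5198/Crypto_aasign2 | encryption.py | createBlocks
-- ===== SOURCE A (Python) =====
-- def createBlocks(message, key, blockSize, alphabets):
--     i=0
--     messageBlocks = []
--     keyBlocks = []
--     while i<(len(message)):
--         j = blockSize-1
--         innerSum = 0
--         while j>=0:
--             currentChar = message[i]
--             innerSum = innerSum+int(ord(currentChar)-65)*(alphabets**j)
--             i = i+1
--             j = j-1
--             if i>=(len(message)):
--                 break
--         messageBlocks.append(innerSum)
--
--     i=0
--     while i<(len(key)):
--         j = blockSize-1
--         innerSum = 0
--         while j>=0: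
--             currentChar = key[i]
--             innerSum = innerSum+int(ord(currentChar)-65)*(alphabets**j)
--             i = i+1
--             j = j-1
--
--             if i>=(len(key)):
--                 break
--         keyBlocks.append(innerSum)
--
--     return messageBlocks, keyBlocks
-- ===== SOURCE B (Python) =====
-- def createBlocks(message, key, blockSize, alphabets):
--     def to_blocks(s):
--         blocks = []
--         for start in range(0, len(s), blockSize):
--             chunk = s[start:start + blockSize]
--             acc = 0
--             for c in chunk:
--                 acc = acc * alphabets + (ord(c) - 65)
--             blocks.append(acc * alphabets ** (blockSize - len(chunk)))
--         return blocks
--     return to_blocks(message), to_blocks(key)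
-- ===== Notes on version B (the rewrite author's own statement) =====
-- stated objective: simpler
-- what changed: A's manual i/j index bookkeeping with a break inside nested while loops is replaced by one helper applied to both strings that slices chunks via range(0, len(s), blockSize) and evaluates each chunk by Horner's rule, scaling the final partial chunk by alphabets**(blockSize-len(chunk)).
-- outside the precondition, e.g. on createBlocks('', '', 0, 26): A returns ([], []), B raises ValueError
import Mathlib
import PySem

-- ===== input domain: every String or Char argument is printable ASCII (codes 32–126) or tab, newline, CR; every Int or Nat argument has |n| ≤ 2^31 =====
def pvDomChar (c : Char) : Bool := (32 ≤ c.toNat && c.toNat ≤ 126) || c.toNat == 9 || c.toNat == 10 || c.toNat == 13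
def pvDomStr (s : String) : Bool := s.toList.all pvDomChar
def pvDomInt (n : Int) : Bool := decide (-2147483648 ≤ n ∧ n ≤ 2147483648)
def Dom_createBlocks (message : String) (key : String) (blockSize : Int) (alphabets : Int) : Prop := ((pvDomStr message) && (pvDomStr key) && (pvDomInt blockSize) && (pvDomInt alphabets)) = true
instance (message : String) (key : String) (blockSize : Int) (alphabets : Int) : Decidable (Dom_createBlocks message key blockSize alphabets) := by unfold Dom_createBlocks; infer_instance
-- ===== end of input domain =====

-- B replaces A's manual i/j index bookkeeping by one helper that slices chunks with range(0,len,blockSize)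
-- and evaluates each chunk by Horner's rule; objective: simpler.

-- ===== PORT A =====
-- inner 'while j>=0' loop: consumes one char of cs per step (message[i]; i=i+1), breaks when the
-- string is exhausted; returns the accumulated innerSum together with the unconsumed characters.
def innerA (cs : List Char) (j : Int) (acc : Int) (alphabets : Int) : Int × List Char :=
  if 0 ≤ j then
    match cs with
    | [] => (acc, [])  -- unreachable from the call site (Python guarantees i < len here)
    | c :: rest =>
      let acc2 := acc + ((c.toNat : Int) - 65) * alphabets ^ j.toNat
      if rest.isEmpty then (acc2, rest) else innerA rest (j - 1) acc2 alphabets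
  else (acc, cs)

-- outer 'while i<len' loop; fuel = cs.length makes the Python loop's possible divergence
-- (blockSize ≤ 0 with a non-empty string, excluded by Pre_) total.
def outerA (fuel : Nat) (cs : List Char) (blockSize : Int) (alphabets : Int) : List Int :=
  match fuel, cs with
  | _, [] => []
  | 0, _ :: _ => []  -- fuel exhausted: only reachable when the Python loop diverges (outside Pre_)
  | fuel + 1, c :: t =>
    let p := innerA (c :: t) (blockSize - 1) 0 alphabets
    p.1 :: outerA fuel p.2 blockSize alphabets

def createBlocks (message : String) (key : String) (blockSize : Int) (alphabets : Int) : List Int × List Int :=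
  (outerA message.toList.length message.toList blockSize alphabets,
   outerA key.toList.length key.toList blockSize alphabets)

-- ===== PORT B =====
-- 'for c in chunk: acc = acc*alphabets + (ord(c)-65)' then 'acc * alphabets**(blockSize-len(chunk))'
def blockValB (chunk : List Char) (blockSize : Int) (alphabets : Int) : Int :=
  (chunk.foldl (fun acc c => acc * alphabets + ((c.toNat : Int) - 65)) 0)
    * alphabets ^ (blockSize - chunk.length).toNat

-- 'for start in range(0, len(s), blockSize): chunk = s[start:start+blockSize]; …'
def toBlocksB (cs : List Char) (blockSize : Int) (alphabets : Int) : List Int :=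
  (PySem.List.pyRange 0 cs.length blockSize).map
    (fun start => blockValB (PySem.List.slice cs (some start) (some (start + blockSize))) blockSize alphabets)

def createBlocks_alt (message : String) (key : String) (blockSize : Int) (alphabets : Int) : List Int × List Int :=
  (toBlocksB message.toList blockSize alphabets, toBlocksB key.toList blockSize alphabets)

-- ===== PRECONDITION & SPEC =====
-- Pre_ excludes blockSize < 1: there Python A loops forever on any non-empty string (and returns
-- ([], []) only in the degenerate case of two empty strings, where B's range step raises ValueError).
def Pre_createBlocks (message : String) (key : String) (blockSize : Int) (alphabets : Int) : Prop :=
  1 ≤ blockSize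
instance (message : String) (key : String) (blockSize : Int) (alphabets : Int) : Decidable (Pre_createBlocks message key blockSize alphabets) := by unfold Pre_createBlocks; infer_instance

def pvWitness_createBlocks : String × String × Int × Int := ("HELLO", "KEY", 2, 26)

def Spec_createBlocks (message : String) (key : String) (blockSize : Int) (alphabets : Int) (out : List Int × List Int) : Prop := out = createBlocks_alt message key blockSize alphabets
instance (message : String) (key : String) (blockSize : Int) (alphabets : Int) (out : List Int × List Int) : Decidable (Spec_createBlocks message key blockSize alphabets out) := by unfold Spec_createBlocks; infer_instance

-- ===== CLAIM (what is proved, stated in full; the proofs are below) =====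
def Claim_equal_createBlocks : Prop := ∀ (message : String) (key : String) (blockSize : Int) (alphabets : Int), Dom_createBlocks message key blockSize alphabets → Pre_createBlocks message key blockSize alphabets → Spec_createBlocks message key blockSize alphabets (createBlocks message key blockSize alphabets)

-- ===== LEMMAS AND PROOFS =====

-- common chunked reference shape: one block per ⟨bn+1⟩-sized chunk of cs
def chunksN (cs : List Char) (bn : Nat) (blockSize : Int) (alphabets : Int) : List Int :=
  match cs with
  | [] => []
  | c :: t =>
    blockValB ((c :: t).take (bn + 1)) blockSize alphabets
      :: chunksN ((c :: t).drop (bn + 1)) bn blockSize alphabets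
termination_by cs.length
decreasing_by simp [List.length_drop]

def hornerAcc (a : Int) (acc : Int) (l : List Char) : Int :=
  l.foldl (fun s c => s * a + ((c.toNat : Int) - 65)) acc

theorem hornerAcc_acc (a : Int) (l : List Char) : ∀ acc, hornerAcc a acc l = acc * a ^ l.length + hornerAcc a 0 l := by
  induction l with
  | nil => simp [hornerAcc]
  | cons c t ih =>
    intro acc
    simp only [hornerAcc, List.foldl_cons, List.length_cons]
    rw [show (t.foldl (fun s c => s * a + ((c.toNat : Int) - 65)) (acc * a + ((c.toNat : Int) - 65))) = hornerAcc a (acc * a + ((c.toNat : Int) - 65)) t from rfl,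
        show (t.foldl (fun s c => s * a + ((c.toNat : Int) - 65)) (0 * a + ((c.toNat : Int) - 65))) = hornerAcc a (0 * a + ((c.toNat : Int) - 65)) t from rfl,
        ih, ih (0 * a + ((c.toNat : Int) - 65))]
    ring

theorem innerA_neg (cs : List Char) (j acc a : Int) (h : j < 0) : innerA cs j acc a = (acc, cs) := by
  rw [innerA.eq_def]; rw [if_neg (by omega)]

theorem innerA_cons (c : Char) (rest : List Char) (j acc a : Int) (h : 0 ≤ j) :
    innerA (c :: rest) j acc a =
      if rest.isEmpty then (acc + ((c.toNat : Int) - 65) * a ^ j.toNat, rest)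
      else innerA rest (j - 1) (acc + ((c.toNat : Int) - 65) * a ^ j.toNat) a := by
  rw [innerA.eq_def]; rw [if_pos h]

theorem innerA_spec (a : Int) : ∀ (cs : List Char) (m : Nat) (acc : Int), cs ≠ [] →
    innerA cs (m : Int) acc a =
      (acc + hornerAcc a 0 (cs.take (m + 1)) * a ^ (m + 1 - min (m + 1) cs.length), cs.drop (m + 1)) := by
  intro cs
  induction cs with
  | nil => intro _ _ h; exact absurd rfl h
  | cons c rest ih =>
    intro m acc _
    rw [innerA_cons c rest (m : Int) acc a (by positivity)]
    by_cases hr : rest = []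
    · subst hr
      simp [hornerAcc, List.take, List.drop]
    · have hne : rest.isEmpty = false := by simpa [List.isEmpty_iff] using hr
      rw [if_neg (by simp [hne])]
      cases m with
      | zero =>
        rw [show ((0 : Nat) : Int) - 1 = (-1 : Int) by norm_num, innerA_neg rest _ _ a (by norm_num)]
        simp [hornerAcc, List.take, List.drop]
      | succ k =>
        have hcast : ((k + 1 : Nat) : Int) - 1 = (k : Int) := by push_cast; ring
        rw [hcast, ih k _ hr]
        have htoNat : ((k + 1 : Nat) : Int).toNat = k + 1 := by simp
        rw [htoNat]
        set t := min (k + 1) rest.length with ht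
        have htle : t ≤ k + 1 := by omega
        have hmin : min (k + 1 + 1) (c :: rest).length = 1 + t := by
          simp [ht]; omega
        have htake : (c :: rest).take (k + 1 + 1) = c :: rest.take (k + 1) := rfl
        have hdrop : (c :: rest).drop (k + 1 + 1) = rest.drop (k + 1) := rfl
        rw [htake, hdrop, hmin]
        have hlen : (rest.take (k + 1)).length = t := by simp [ht]
        have hH : hornerAcc a 0 (c :: rest.take (k + 1)) =
            ((c.toNat : Int) - 65) * a ^ t + hornerAcc a 0 (rest.take (k + 1)) := by
          have h1 : hornerAcc a 0 (c :: rest.take (k + 1)) = hornerAcc a (0 * a + ((c.toNat : Int) - 65)) (rest.take (k + 1)) := rfl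
          rw [h1, hornerAcc_acc, hlen]; ring
        rw [hH]
        have hexp : k + 1 + 1 - (1 + t) = k + 1 - t := by omega
        rw [hexp]
        have hpow : a ^ t * a ^ (k + 1 - t) = a ^ (k + 1) := by
          rw [← pow_add]; congr 1; omega
        have : ((c.toNat : Int) - 65) * a ^ t + hornerAcc a 0 (rest.take (k + 1))
            = hornerAcc a 0 (rest.take (k + 1)) + ((c.toNat : Int) - 65) * a ^ t := by ring
        rw [Prod.mk.injEq]
        refine ⟨?_, rfl⟩
        rw [add_mul, mul_assoc, hpow]
        ring

theorem outerA_eq (b a : Int) (hb : 1 ≤ b) : ∀ (fuel : Nat) (cs : List Char), cs.length ≤ fuel →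
    outerA fuel cs b a = chunksN cs (b - 1).toNat b a := by
  intro fuel
  induction fuel with
  | zero =>
    intro cs h
    have : cs = [] := by cases cs <;> simp_all
    subst this; simp [outerA, chunksN]
  | succ n ih =>
    intro cs h
    cases cs with
    | nil => simp [outerA, chunksN]
    | cons c t =>
      rw [outerA, chunksN]
      have hm : b - 1 = (((b - 1).toNat : Nat) : Int) := by omega
      rw [hm, innerA_spec a (c :: t) (b - 1).toNat 0 (by simp)]
      set m := (b - 1).toNat with hmdef
      have hval : blockValB ((c :: t).take (m + 1)) b a =
          0 + hornerAcc a 0 ((c :: t).take (m + 1)) * a ^ (m + 1 - min (m + 1) (c :: t).length) := by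
        unfold blockValB hornerAcc
        have hlen : ((c :: t).take (m + 1)).length = min (m + 1) (c :: t).length := by simp
        rw [hlen]
        have hexp : (b - (min (m + 1) (c :: t).length : Nat)).toNat = m + 1 - min (m + 1) (c :: t).length := by
          have h1 : min (m + 1) (c :: t).length ≤ m + 1 := by omega
          omega
        rw [hexp, zero_add]
      rw [← hval]
      have hrec : outerA n ((c :: t).drop (m + 1)) b a = chunksN ((c :: t).drop (m + 1)) m b a := by
        apply ih
        simp only [List.length_drop]
        simp at h ⊢
        omega
      rw [hrec]
      simp

theorem pyRange_pos_nil (x s : Int) (hs : 0 < s) (hx : x ≤ 0) : PySem.List.pyRange 0 x s = [] := by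
  rw [PySem.List.pyRange_of_pos _ _ hs]
  have : ¬ (0 : Int) < x := by omega
  simp [this]

theorem pyRange_pos_cons (x b : Int) (hb : 0 < b) (hx : 0 < x) :
    PySem.List.pyRange 0 x b = 0 :: (PySem.List.pyRange 0 (x - b) b).map (· + b) := by
  rw [PySem.List.pyRange_of_pos _ _ hb, PySem.List.pyRange_of_pos _ _ hb]
  have hbne : b ≠ 0 := by omega
  have hsplit : x - 0 + b - 1 = (x - 1) + 1 * b := by ring
  have hdiv : (x - 0 + b - 1) / b = (x - 1) / b + 1 := by
    rw [hsplit, Int.add_mul_ediv_right _ _ hbne]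
  have hd0 : 0 ≤ (x - 1) / b := Int.ediv_nonneg (by omega) (by omega)
  have hcnt : ((x - 0 + b - 1) / b).toNat = ((x - 1) / b).toNat + 1 := by
    rw [hdiv]; omega
  rw [if_pos hx, hcnt, List.range_succ_eq_map]
  simp only [List.map_cons, List.map_map]
  rw [List.cons.injEq]
  refine ⟨by simp, ?_⟩
  · by_cases hxb : b < x
    · have : x - b - 0 + b - 1 = x - 1 := by ring
      rw [if_pos (by omega : (0:Int) < x - b), this]
      apply List.map_congr_left
      intro k _
      simp [Function.comp]; ring
    · have hle : x - 1 < b := by omega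
      have : (x - 1) / b = 0 := Int.ediv_eq_zero_of_lt (by omega) hle
      rw [this, if_neg (by omega : ¬ (0:Int) < x - b)]
      simp

theorem toBlocksB_eq (b a : Int) (hb : 1 ≤ b) : ∀ (n : Nat) (cs : List Char), cs.length ≤ n →
    toBlocksB cs b a = chunksN cs (b - 1).toNat b a := by
  intro n
  induction n with
  | zero =>
    intro cs h
    have : cs = [] := by cases cs <;> simp_all
    subst this
    simp [toBlocksB, chunksN, pyRange_pos_nil 0 b (by omega) (by omega)]
  | succ n ih =>
    intro cs h
    cases hcs : cs with
    | nil => simp [toBlocksB, chunksN, pyRange_pos_nil 0 b (by omega) (by omega)]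
    | cons c t =>
      subst hcs
      set m := (b - 1).toNat with hmdef
      have hbm : b = ((m + 1 : Nat) : Int) := by omega
      have hxpos : (0 : Int) < ((c :: t).length : Int) := by simp
      unfold toBlocksB
      rw [pyRange_pos_cons _ b (by omega) hxpos, List.map_cons, List.map_map]
      rw [chunksN]
      rw [List.cons.injEq]
      constructor
      · -- head block: slice cs 0 b = take b.toNat cs
        have h0b : (0 : Int) + b = b := by ring
        rw [h0b]
        have : PySem.List.slice (c :: t) (some 0) (some b) = (c :: t).take b.toNat := by
          rw [show (some (0:Int)) = some ((0:Nat):Int) by norm_num]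
          rw [show (some b) = some ((b.toNat : Nat) : Int) by rw [Int.toNat_of_nonneg (by omega : (0:Int) ≤ b)]]
          rw [PySem.List.slice_natCast]
          simp
        have hbt : b.toNat = m + 1 := by omega
        rw [this, hbt]
      · -- tail: shift by b and recurse
        have hcongr : ∀ start ∈ PySem.List.pyRange 0 (((c :: t).length : Int) - b) b,
            blockValB (PySem.List.slice (c :: t) (some (start + b)) (some (start + b + b))) b a =
            blockValB (PySem.List.slice ((c :: t).drop b.toNat) (some start) (some (start + b))) b a := by
          intro start hmem
          have hst : 0 ≤ start := by
            have := (PySem.List.mem_pyRange_iff_of_pos (by omega : (0:Int) < b) start).mp hmem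
            omega
          congr 1
          rw [PySem.List.slice_toNat _ (by omega) (by omega),
              PySem.List.slice_toNat _ hst (by omega)]
          rw [List.drop_drop]
          congr 1
          · omega
          · congr 1; omega
        have hrange : PySem.List.pyRange 0 (((c :: t).length : Int) - b) b =
            PySem.List.pyRange 0 ((((c :: t).drop b.toNat).length : Nat) : Int) b := by
          by_cases hble : b ≤ ((c :: t).length : Int)
          · congr 1
            simp only [List.length_drop]
            omega
          · rw [pyRange_pos_nil _ b (by omega) (by omega),
                pyRange_pos_nil _ b (by omega) (by simp only [List.length_drop]; omega)]
        have hIH : toBlocksB ((c :: t).drop b.toNat) b a = chunksN ((c :: t).drop b.toNat) m b a := by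
          apply ih
          simp only [List.length_drop, List.length_cons]
          simp only [List.length_cons] at h
          omega
        have hdropeq : (c :: t).drop b.toNat = (c :: t).drop (m + 1) := by congr 1; omega
        calc List.map ((fun start => blockValB (PySem.List.slice (c :: t) (some start) (some (start + b))) b a) ∘ fun x => x + b)
              (PySem.List.pyRange 0 (((c :: t).length : Int) - b) b)
            = (PySem.List.pyRange 0 (((c :: t).length : Int) - b) b).map
              (fun start => blockValB (PySem.List.slice (c :: t) (some (start + b)) (some (start + b + b))) b a) := rfl
          _ = (PySem.List.pyRange 0 (((c :: t).length : Int) - b) b).map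
              (fun start => blockValB (PySem.List.slice ((c :: t).drop b.toNat) (some start) (some (start + b))) b a) :=
              List.map_congr_left hcongr
          _ = toBlocksB ((c :: t).drop b.toNat) b a := by
              unfold toBlocksB; rw [hrange]
          _ = chunksN ((c :: t).drop (m + 1)) m b a := by rw [hIH, hdropeq]

-- ===== VERDICT (by name: the statement is the Claim_ definition above) =====
theorem createBlocks_spec : Claim_equal_createBlocks := by
  intro message key blockSize alphabets _ hpre
  unfold Spec_createBlocks createBlocks createBlocks_alt
  rw [outerA_eq blockSize alphabets hpre _ _ (le_refl _),
      outerA_eq blockSize alphabets hpre _ _ (le_refl _),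
      toBlocksB_eq blockSize alphabets hpre message.toList.length _ (le_refl _),
      toBlocksB_eq blockSize alphabets hpre key.toList.length _ (le_refl _)]
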